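-- pv_equiv track=rewrite | github.com/YilinGUO/MLT | strategy_learner/StrategyLearner.py | getTrades
-- ===== SOURCE A (Python) =====
-- def getTrades(yVals):
--     current_stocks = 0
--     retVal = []
--     for val in yVals:
--         if val == 1:
--         # if val > 0 and val > self.impact:
--             new_stocks = 1000
--             tradeVals = new_stocks - current_stocks
--             retVal.append(tradeVals)
--             current_stocks = new_stocks
--         elif val == -1:
--         # elif val < 0 and abs(val) > self.impact:
--             new_stocks = -1000
--             tradeVals = new_stocks - current_stocks
--             retVal.append(tradeVals)
--             current_stocks = new_stocks
--         else:
--             # new_stocks = current_stocks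
--             tradeVals = 0
--             retVal.append(tradeVals)
--             # current_stocks = new_stocks
--     return retVal
-- ===== SOURCE B (Python) =====
-- def getTrades(yVals):
--     # Pass 1: target holdings after each step.
--     positions = []
--     cur = 0
--     for val in yVals:
--         if val == 1:
--             cur = 1000
--         elif val == -1:
--             cur = -1000
--         positions.append(cur)
--     # Pass 2: successive differences against a leading 0.
--     return [p - q for p, q in zip(positions, [0] + positions)]
-- ===== Notes on version B (the rewrite author's own statement) =====
-- stated objective: alternative
-- what changed: Two-pass decomposition: first build the list of target holdings, then return its successive differences against a 0-prefixed copy, instead of A's single loop maintaining holdings and emitting deltas in-place.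
import Mathlib
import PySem

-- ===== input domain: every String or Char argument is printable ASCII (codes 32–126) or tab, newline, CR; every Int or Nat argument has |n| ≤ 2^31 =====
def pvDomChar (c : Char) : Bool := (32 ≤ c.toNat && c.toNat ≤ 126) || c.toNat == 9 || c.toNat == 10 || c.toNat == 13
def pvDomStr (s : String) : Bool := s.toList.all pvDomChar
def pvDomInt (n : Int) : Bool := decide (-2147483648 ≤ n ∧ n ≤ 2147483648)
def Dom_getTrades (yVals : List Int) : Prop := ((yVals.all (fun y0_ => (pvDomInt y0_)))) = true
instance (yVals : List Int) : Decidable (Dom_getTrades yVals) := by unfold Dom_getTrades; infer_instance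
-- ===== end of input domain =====

-- B replaces A's single delta-emitting loop by a two-pass decomposition (build target holdings, then successive differences); alternative, same cost.


-- ===== PORT A =====
-- single loop over yVals with state (current_stocks, retVal), appending each trade delta
def getTrades (yVals : List Int) : List Int :=
  (yVals.foldl
    (fun (st : Int × List Int) val =>
      if val = 1 then (1000, st.2 ++ [1000 - st.1])
      else if val = -1 then (-1000, st.2 ++ [-1000 - st.1])
      else (st.1, st.2 ++ [0]))
    (0, [])).2

-- ===== PORT B =====
-- pass 1: target holdings; pass 2: zip with the 0-prefixed holdings list and subtract
def getTrades_alt (yVals : List Int) : List Int :=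
  let positions := (yVals.foldl
    (fun (st : Int × List Int) val =>
      let cur := if val = 1 then 1000 else if val = -1 then -1000 else st.1
      (cur, st.2 ++ [cur]))
    (0, [])).2
  ((List.zip positions (0 :: positions)).map (fun pq => pq.1 - pq.2))

-- ===== PRECONDITION & SPEC =====
def Spec_getTrades (yVals : List Int) (out : List Int) : Prop := out = getTrades_alt yVals
instance (yVals : List Int) (out : List Int) : Decidable (Spec_getTrades yVals out) := by unfold Spec_getTrades; infer_instance

-- ===== CLAIM (what is proved, stated in full; the proofs are below) =====
def Claim_equal_getTrades : Prop := ∀ (yVals : List Int), Dom_getTrades yVals → Spec_getTrades yVals (getTrades yVals)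

-- ===== LEMMAS AND PROOFS =====

-- reference recursions for the two loops
def pvDeltas (cur : Int) : List Int → List Int
  | [] => []
  | v :: vs =>
    if v = 1 then (1000 - cur) :: pvDeltas 1000 vs
    else if v = -1 then (-1000 - cur) :: pvDeltas (-1000) vs
    else 0 :: pvDeltas cur vs

def pvPos (cur : Int) : List Int → List Int
  | [] => []
  | v :: vs =>
    let c := if v = 1 then 1000 else if v = -1 then -1000 else cur
    c :: pvPos c vs

theorem pvFoldA (vs : List Int) : ∀ (cur : Int) (acc : List Int),
    (vs.foldl
      (fun (st : Int × List Int) val =>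
        if val = 1 then (1000, st.2 ++ [1000 - st.1])
        else if val = -1 then (-1000, st.2 ++ [-1000 - st.1])
        else (st.1, st.2 ++ [0]))
      (cur, acc)).2 = acc ++ pvDeltas cur vs := by
  induction vs with
  | nil => simp [pvDeltas]
  | cons v vs ih =>
    intro cur acc
    by_cases h1 : v = 1 <;> by_cases h2 : v = -1 <;>
      simp [pvDeltas, h1, h2, ih]

theorem pvFoldB (vs : List Int) : ∀ (cur : Int) (acc : List Int),
    (vs.foldl
      (fun (st : Int × List Int) val =>
        let cur := if val = 1 then 1000 else if val = -1 then -1000 else st.1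
        (cur, st.2 ++ [cur]))
      (cur, acc)).2 = acc ++ pvPos cur vs := by
  induction vs with
  | nil => simp [pvPos]
  | cons v vs ih =>
    intro cur acc
    by_cases h1 : v = 1 <;> by_cases h2 : v = -1 <;>
      simp [pvPos, h1, h2, ih]

theorem pvDeltas_eq_zip (vs : List Int) : ∀ (cur : Int),
    pvDeltas cur vs = ((List.zip (pvPos cur vs) (cur :: pvPos cur vs)).map (fun pq => pq.1 - pq.2)) := by
  induction vs with
  | nil => simp [pvDeltas, pvPos]
  | cons v vs ih =>
    intro cur
    by_cases h1 : v = 1 <;> by_cases h2 : v = -1 <;>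
      simp [pvDeltas, pvPos, h1, h2, ← ih]

-- ===== VERDICT (by name: the statement is the Claim_ definition above) =====
theorem getTrades_spec : Claim_equal_getTrades := by
  intro yVals _
  show getTrades yVals = getTrades_alt yVals
  simp [getTrades, getTrades_alt, pvFoldA, pvFoldB, pvDeltas_eq_zip]
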